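-- pv_equiv track=rewrite | github.com/harshqec/harshqec.github.io | web_app/api/math_logic.py | exact_distance
-- ===== SOURCE A (Python) =====
-- from itertools import combinations, product, permutations
--
-- def pauli_weight(x, z):
--     return (int(x) | int(z)).bit_count()
--
-- def pauli_mul(x1, z1, x2, z2):
--     return int(x1) ^ int(x2), int(z1) ^ int(z2)
--
-- def enumerate_stabilizer_group(stab_xs, stab_zs):
--     r = len(stab_xs)
--     group = []
--
--     for coeffs in product([0, 1], repeat=r):
--         x = 0
--         z = 0
--         for c, sx, sz in zip(coeffs, stab_xs, stab_zs):
--             if c: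
--                 x ^= int(sx)
--                 z ^= int(sz)
--         group.append((x, z))
--
--     return group
--
-- def exact_distance(stab_xs, stab_zs, logical_xs, logical_zs):
--     """
--     Iterates over all combinations of the stabilizer operators and logical Pauli operators
--     to find the minimum distance d of the code (the lowest-weight non-trivial logical operator).
--
--     Args:
--         stab_xs, stab_zs: Packed binary representation of stabilizers.
--         logical_xs, logical_zs: Binary representations of the extracted logical operators.
--
--     Returns:
--         int: Minimum exact distance of the code space.
--     """
--     k = len(logical_xs)
--     if k == 0:
--         return 0
--
--     stab_group = enumerate_stabilizer_group(stab_xs, stab_zs)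
--     min_w = float("inf")
--
--     for coeffs in product([0, 1], repeat=2 * k):
--         if not any(coeffs):
--             continue
--
--         lx = 0
--         lz = 0
--
--         for i in range(k):
--             if coeffs[i]:
--                 lx ^= int(logical_xs[i][0])
--                 lz ^= int(logical_xs[i][1])
--             if coeffs[k + i]:
--                 lx ^= int(logical_zs[i][0])
--                 lz ^= int(logical_zs[i][1])
--
--         for sx, sz in stab_group:
--             x, z = pauli_mul(lx, lz, sx, sz)
--             w = pauli_weight(x, z)
--             if w < min_w:
--                 min_w = w
--
--     return int(min_w) if min_w != float("inf") else 0
-- ===== SOURCE B (Python) =====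
-- from itertools import product
--
-- def exact_distance(stab_xs, stab_zs, logical_xs, logical_zs):
--     """Single flat enumeration over logical+stabilizer coefficient bits; no
--     separate stabilizer-group table. Same return value as the table version."""
--     k = len(logical_xs)
--     if k == 0:
--         return 0
--
--     gens = [(int(x), int(z)) for x, z in logical_xs]
--     gens += [(int(x), int(z)) for x, z in logical_zs[:k]]
--     gens += [(int(x), int(z)) for x, z in zip(stab_xs, stab_zs)]
--
--     best = None
--     for bits in product([0, 1], repeat=2 * k + len(stab_xs)):
--         if not any(bits[:2 * k]):
--             continue
--         x = 0
--         z = 0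
--         for b, (gx, gz) in zip(bits, gens):
--             if b:
--                 x ^= gx
--                 z ^= gz
--         w = (x | z).bit_count()
--         if best is None or w < best:
--             best = w
--
--     return best if best is not None else 0
-- ===== Notes on version B (the rewrite author's own statement) =====
-- stated objective: simpler
-- what changed: Drops the precomputed stabilizer-group table and the per-index interleaved logical loop: one flat enumeration over all 2k+r coefficient bits against a single concatenated generator list, skipping vectors whose logical prefix is all zero.
import Mathlib
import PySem

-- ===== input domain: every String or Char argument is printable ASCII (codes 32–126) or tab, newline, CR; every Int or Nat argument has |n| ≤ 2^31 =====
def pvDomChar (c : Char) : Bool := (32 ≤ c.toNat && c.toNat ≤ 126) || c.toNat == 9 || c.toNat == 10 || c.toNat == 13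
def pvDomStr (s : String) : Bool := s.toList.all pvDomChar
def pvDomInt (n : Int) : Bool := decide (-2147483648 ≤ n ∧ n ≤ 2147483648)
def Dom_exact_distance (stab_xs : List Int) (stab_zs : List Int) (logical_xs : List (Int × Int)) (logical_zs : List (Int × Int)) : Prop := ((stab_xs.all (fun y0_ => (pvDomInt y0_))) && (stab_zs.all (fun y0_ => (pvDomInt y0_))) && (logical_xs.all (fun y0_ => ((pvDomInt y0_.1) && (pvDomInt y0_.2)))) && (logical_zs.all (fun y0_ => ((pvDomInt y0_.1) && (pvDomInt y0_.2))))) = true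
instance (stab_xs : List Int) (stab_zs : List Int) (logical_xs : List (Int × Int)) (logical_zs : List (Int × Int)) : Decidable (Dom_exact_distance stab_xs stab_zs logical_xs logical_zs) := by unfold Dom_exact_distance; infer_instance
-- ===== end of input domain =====

-- B replaces A's precomputed stabilizer-group table and interleaved indexed logical loop by one
-- flat enumeration over all logical+stabilizer coefficient bits against a concatenated generator
-- list (objective: simpler; same cost class, not claimed faster).

-- ===== PORT A =====
-- itertools.product([0, 1], repeat=n) (shared by both ports: both Pythons call product)
def pvProd01 : Nat → List (List Int)
  | 0 => [[]]
  | n + 1 => ([0, 1] : List Int).flatMap (fun a => (pvProd01 n).map (fun rest => a :: rest))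

-- pauli_weight(x, z)
def pvPauliWeight (x z : Int) : Int := (PySem.Int.bitCount (PySem.Int.bor x z) : Int)

-- pauli_mul(x1, z1, x2, z2)
def pvPauliMul (x1 z1 x2 z2 : Int) : Int × Int := (PySem.Int.bxor x1 x2, PySem.Int.bxor z1 z2)

-- loop body 'if c: x ^= gx; z ^= gz' over zipped (coefficient, generator) pairs
-- (shared by both ports: the same two lines occur in both Pythons)
def pvAccXor (p : Int × Int) (cg : Int × (Int × Int)) : Int × Int :=
  if cg.1 != 0 then (PySem.Int.bxor p.1 cg.2.1, PySem.Int.bxor p.2 cg.2.2) else p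

-- running-minimum update: A's 'if w < min_w' over float('inf'), B's 'if best is None or w < best'
def pvMinStep (mw : Option Int) (w : Int) : Option Int :=
  match mw with
  | none => some w
  | some m => if w < m then some w else mw

-- 'int(min_w) if min_w != float("inf") else 0'  /  'best if best is not None else 0'
def pvFinish (mw : Option Int) : Int :=
  match mw with
  | none => 0
  | some m => m

-- enumerate_stabilizer_group(stab_xs, stab_zs)
def pvEnumerateStabilizerGroup (stab_xs stab_zs : List Int) : List (Int × Int) :=
  (pvProd01 stab_xs.length).foldl
    (fun group coeffs => group ++ [(coeffs.zip (stab_xs.zip stab_zs)).foldl pvAccXor (0, 0)]) []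

-- A's 'for i in range(k): if coeffs[i]: … ; if coeffs[k + i]: …' loop
def pvLogicalXor (coeffs : List Int) (lxs lzs : List (Int × Int)) (k : Nat) : Int × Int :=
  (PySem.List.pyRange 0 (k : Int) 1).foldl
    (fun p i =>
      let p1 := if PySem.List.pyGetD coeffs i 0 != 0 then
          (PySem.Int.bxor p.1 (PySem.List.pyGetD lxs i (0, 0)).1,
           PySem.Int.bxor p.2 (PySem.List.pyGetD lxs i (0, 0)).2) else p
      if PySem.List.pyGetD coeffs ((k : Int) + i) 0 != 0 then
          (PySem.Int.bxor p1.1 (PySem.List.pyGetD lzs i (0, 0)).1,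
           PySem.Int.bxor p1.2 (PySem.List.pyGetD lzs i (0, 0)).2) else p1)
    (0, 0)

def exact_distance (stab_xs : List Int) (stab_zs : List Int) (logical_xs : List (Int × Int)) (logical_zs : List (Int × Int)) : Int :=
  if logical_xs.length = 0 then 0
  else
    let k := logical_xs.length
    let stab_group := pvEnumerateStabilizerGroup stab_xs stab_zs
    let min_w : Option Int :=
      (pvProd01 (2 * k)).foldl
        (fun mw coeffs =>
          if !(coeffs.any (fun c => c != 0)) then mw
          else
            let lxz := pvLogicalXor coeffs logical_xs logical_zs k
            stab_group.foldl
              (fun mw2 s =>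
                let xz := pvPauliMul lxz.1 lxz.2 s.1 s.2
                pvMinStep mw2 (pvPauliWeight xz.1 xz.2)) mw)
        none
    pvFinish min_w

-- ===== PORT B =====
def exact_distance_alt (stab_xs : List Int) (stab_zs : List Int) (logical_xs : List (Int × Int)) (logical_zs : List (Int × Int)) : Int :=
  if logical_xs.length = 0 then 0
  else
    let k := logical_xs.length
    let gens : List (Int × Int) :=
      logical_xs ++ PySem.List.slice logical_zs none (some (k : Int)) ++ stab_xs.zip stab_zs
    let best : Option Int :=
      (pvProd01 (2 * k + stab_xs.length)).foldl
        (fun best bits =>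
          if !((PySem.List.slice bits none (some ((2 * k : Nat) : Int))).any (fun c => c != 0)) then best
          else
            let xz := (bits.zip gens).foldl pvAccXor (0, 0)
            pvMinStep best (PySem.Int.bitCount (PySem.Int.bor xz.1 xz.2) : Int))
        none
    pvFinish best

-- ===== PRECONDITION & SPEC =====
-- Pre_ excludes exactly the inputs on which A raises IndexError: logical_zs shorter than
-- logical_xs (A indexes logical_zs[i] for every i < len(logical_xs)); A returns on all others.
def Pre_exact_distance (stab_xs : List Int) (stab_zs : List Int) (logical_xs : List (Int × Int)) (logical_zs : List (Int × Int)) : Prop :=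
  logical_xs.length ≤ logical_zs.length
instance (stab_xs : List Int) (stab_zs : List Int) (logical_xs : List (Int × Int)) (logical_zs : List (Int × Int)) : Decidable (Pre_exact_distance stab_xs stab_zs logical_xs logical_zs) := by unfold Pre_exact_distance; infer_instance

def pvWitness_exact_distance : List Int × List Int × (List (Int × Int)) × (List (Int × Int)) :=
  ([3], [5], [(1, 0)], [(0, 1)])

def Spec_exact_distance (stab_xs : List Int) (stab_zs : List Int) (logical_xs : List (Int × Int)) (logical_zs : List (Int × Int)) (out : Int) : Prop := out = exact_distance_alt stab_xs stab_zs logical_xs logical_zs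
instance (stab_xs : List Int) (stab_zs : List Int) (logical_xs : List (Int × Int)) (logical_zs : List (Int × Int)) (out : Int) : Decidable (Spec_exact_distance stab_xs stab_zs logical_xs logical_zs out) := by unfold Spec_exact_distance; infer_instance

-- ===== CLAIM (what is proved, stated in full; the proofs are below) =====
def Claim_equal_exact_distance : Prop := ∀ (stab_xs : List Int) (stab_zs : List Int) (logical_xs : List (Int × Int)) (logical_zs : List (Int × Int)), Dom_exact_distance stab_xs stab_zs logical_xs logical_zs → Pre_exact_distance stab_xs stab_zs logical_xs logical_zs → Spec_exact_distance stab_xs stab_zs logical_xs logical_zs (exact_distance stab_xs stab_zs logical_xs logical_zs)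

-- ===== LEMMAS AND PROOFS =====

-- Python's ^ on Int is commutative and associative; PySem ships bxor_comm but not bxor_assoc.
theorem pvBxor_pn (m n : Nat) : PySem.Int.bxor ((m : Nat) : Int) (Int.negSucc n) = Int.negSucc (m ^^^ n) := by
  simp only [PySem.Int.bxor]
  rw [if_pos (Int.natCast_nonneg m), if_neg (by omega)]
  have h : (-Int.negSucc n - 1) = (n : Int) := by omega
  rw [h]
  have h2 : ((m : Nat) : Int).toNat = m := rfl
  have h3 : ((n : Int)).toNat = n := rfl
  rw [h2, h3, Int.negSucc_eq]
  omega

theorem pvBxor_np (m n : Nat) : PySem.Int.bxor (Int.negSucc m) ((n : Nat) : Int) = Int.negSucc (m ^^^ n) := by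
  rw [PySem.Int.bxor_comm, pvBxor_pn, Nat.xor_comm]

theorem pvBxor_nn (m n : Nat) : PySem.Int.bxor (Int.negSucc m) (Int.negSucc n) = ((m ^^^ n : Nat) : Int) := by
  simp only [PySem.Int.bxor]
  rw [if_neg (by omega), if_neg (by omega)]
  have h1 : (-Int.negSucc m - 1) = (m : Int) := by omega
  have h2 : (-Int.negSucc n - 1) = (n : Int) := by omega
  rw [h1, h2]
  have h3 : ((m : Int)).toNat = m := rfl
  have h4 : ((n : Int)).toNat = n := rfl
  rw [h3, h4]

theorem pvBxor_assoc (a b c : Int) :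
    PySem.Int.bxor (PySem.Int.bxor a b) c = PySem.Int.bxor a (PySem.Int.bxor b c) := by
  rcases a with m | m <;> rcases b with n | n <;> rcases c with o | o <;>
    simp [Int.ofNat_eq_natCast, pvBxor_pn, pvBxor_np, pvBxor_nn, Nat.xor_assoc]

theorem pvBxor_zero_left (a : Int) : PySem.Int.bxor 0 a = a := by
  rw [PySem.Int.bxor_comm, PySem.Int.bxor_zero]

theorem pvBxor_four (p a b c d : Int) :
    PySem.Int.bxor (PySem.Int.bxor (PySem.Int.bxor p a) b) (PySem.Int.bxor c d)
      = PySem.Int.bxor p (PySem.Int.bxor (PySem.Int.bxor a c) (PySem.Int.bxor b d)) := by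
  have h1 : PySem.Int.bxor (PySem.Int.bxor (PySem.Int.bxor p a) b) (PySem.Int.bxor c d)
      = PySem.Int.bxor p (PySem.Int.bxor a (PySem.Int.bxor b (PySem.Int.bxor c d))) := by
    rw [pvBxor_assoc, pvBxor_assoc]
  have h2 : PySem.Int.bxor (PySem.Int.bxor a c) (PySem.Int.bxor b d)
      = PySem.Int.bxor a (PySem.Int.bxor c (PySem.Int.bxor b d)) := by rw [pvBxor_assoc]
  have h3 : PySem.Int.bxor b (PySem.Int.bxor c d) = PySem.Int.bxor c (PySem.Int.bxor b d) := by
    rw [← pvBxor_assoc, PySem.Int.bxor_comm b c, pvBxor_assoc]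
  rw [h1, h2, h3]

-- componentwise xor on (x, z) pairs, the selected generator, and xor-sums of selections
def pvPxor (p q : Int × Int) : Int × Int := (PySem.Int.bxor p.1 q.1, PySem.Int.bxor p.2 q.2)
def pvSel (c : Int) (g : Int × Int) : Int × Int := if c != 0 then g else (0, 0)
def pvQstep (p : Int × Int) (q : (Int × (Int × Int)) × (Int × (Int × Int))) : Int × Int :=
  pvPxor (pvPxor p (pvSel q.1.1 q.1.2)) (pvSel q.2.1 q.2.2)
def pvSum (l : List (Int × (Int × Int))) : Int × Int := l.foldl pvAccXor (0, 0)

theorem pvPxor_zero_right (p : Int × Int) : pvPxor p (0, 0) = p := by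
  simp [pvPxor, PySem.Int.bxor_zero]

theorem pvPxor_zero_left (p : Int × Int) : pvPxor (0, 0) p = p := by
  simp [pvPxor, pvBxor_zero_left]

theorem pvPxor_assoc (p q r : Int × Int) : pvPxor (pvPxor p q) r = pvPxor p (pvPxor q r) := by
  simp [pvPxor, pvBxor_assoc]

theorem pvPxor_four (p a b c d : Int × Int) :
    pvPxor (pvPxor (pvPxor p a) b) (pvPxor c d) = pvPxor p (pvPxor (pvPxor a c) (pvPxor b d)) := by
  simp [pvPxor, pvBxor_four]

theorem pvAccXor_eq (p : Int × Int) (cg : Int × (Int × Int)) :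
    pvAccXor p cg = pvPxor p (pvSel cg.1 cg.2) := by
  by_cases h : cg.1 != 0 <;> simp [pvAccXor, pvSel, pvPxor, h, PySem.Int.bxor_zero]

theorem pvFoldl_accXor (l : List (Int × (Int × Int))) :
    ∀ p, l.foldl pvAccXor p = pvPxor p (pvSum l) := by
  induction l with
  | nil => intro p; simp [pvSum, pvPxor_zero_right]
  | cons x t ih =>
    intro p
    show List.foldl pvAccXor (pvAccXor p x) t = pvPxor p (List.foldl pvAccXor (pvAccXor (0,0) x) t)
    rw [ih, ih, pvAccXor_eq, pvAccXor_eq, pvPxor_zero_left, pvPxor_assoc]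

theorem pvSum_cons (x : Int × (Int × Int)) (t : List (Int × (Int × Int))) :
    pvSum (x :: t) = pvPxor (pvSel x.1 x.2) (pvSum t) := by
  show List.foldl pvAccXor (pvAccXor (0,0) x) t = _
  rw [pvFoldl_accXor, pvAccXor_eq, pvPxor_zero_left]

theorem pvQuadSplit : ∀ (l1 l2 : List (Int × (Int × Int))) (p : Int × Int),
    l1.length = l2.length →
    (l1.zip l2).foldl pvQstep p = pvPxor p (pvPxor (pvSum l1) (pvSum l2)) := by
  intro l1
  induction l1 with
  | nil =>
    intro l2 p h
    cases l2 with
    | nil => simp [pvSum, pvPxor_zero_right]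
    | cons y u => simp at h
  | cons x t ih =>
    intro l2 p h
    cases l2 with
    | nil => simp at h
    | cons y u =>
      simp only [List.zip_cons_cons, List.foldl_cons]
      rw [ih u _ (by simpa using h), pvSum_cons, pvSum_cons]
      show pvPxor (pvQstep p (x, y)) _ = _
      unfold pvQstep
      exact pvPxor_four p (pvSel x.1 x.2) (pvSel y.1 y.2) (pvSum t) (pvSum u)

theorem pvProd01_length {n : Nat} {c : List Int} (h : c ∈ pvProd01 n) : c.length = n := by
  induction n generalizing c with
  | zero => simp [pvProd01] at h; simp [h]
  | succ n ih =>
    simp only [pvProd01, List.mem_flatMap, List.mem_map] at h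
    obtain ⟨a, _, rest, hr, rfl⟩ := h
    simp [ih hr]

theorem pvProd01_add (m n : Nat) :
    pvProd01 (m + n) = (pvProd01 m).flatMap (fun c1 => (pvProd01 n).map (fun c2 => c1 ++ c2)) := by
  induction m with
  | zero => simp [pvProd01]
  | succ m ih =>
    rw [show m + 1 + n = (m + n) + 1 from by omega]
    simp only [pvProd01, ih]
    simp [List.flatMap_map, List.map_flatMap, List.map_map, Function.comp_def, List.cons_append]

theorem pvGroup_eq (sx sz : List Int) :
    pvEnumerateStabilizerGroup sx sz
      = (pvProd01 sx.length).map (fun c => (c.zip (sx.zip sz)).foldl pvAccXor (0, 0)) := by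
  unfold pvEnumerateStabilizerGroup
  rw [PySem.List.foldl_append_singleton_eq_map]
  simp

theorem pvFoldl_keep (l : List (List Int)) (i : Option Int) :
    l.foldl (fun acc _ => acc) i = i := by
  induction l generalizing i with
  | nil => rfl
  | cons x t ih => simp [ih]

theorem pvZipTakeRight : ∀ {α β : Type} (as_ : List α) (bs : List β) (n : Nat),
    as_.length ≤ n → as_.zip (bs.take n) = as_.zip bs := by
  intro α β as_
  induction as_ with
  | nil => intro bs n _; simp
  | cons x t ih =>
    intro bs n h
    cases bs with
    | nil => simp
    | cons y u =>
      cases n with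
      | zero => simp at h
      | succ n => simp [List.zip_cons_cons, ih u n (by simpa using h)]

-- one step of A's indexed logical loop is a pvQstep
theorem pvBodyStep (p : Int × Int) (c c' : Int) (g g' : Int × Int) :
    (let p1 := if c != 0 then (PySem.Int.bxor p.1 g.1, PySem.Int.bxor p.2 g.2) else p
     if c' != 0 then (PySem.Int.bxor p1.1 g'.1, PySem.Int.bxor p1.2 g'.2) else p1)
      = pvQstep p ((c, g), (c', g')) := by
  by_cases h : c != 0 <;> by_cases h' : c' != 0 <;>
    simp [pvQstep, pvSel, pvPxor, h, h', PySem.Int.bxor_zero]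

-- A's indexed loop over range(j, k) equals a pvQstep fold over the zipped quadruple suffix
theorem pvIdxFold (coeffs : List Int) (lxs lzs : List (Int × Int))
    (hc : coeffs.length = 2 * lxs.length) (hz : lxs.length ≤ lzs.length) :
    ∀ (n j : Nat), j + n = lxs.length → ∀ p : Int × Int,
      (PySem.List.pyRange (j : Int) (lxs.length : Int) 1).foldl
        (fun p i =>
          let p1 := if PySem.List.pyGetD coeffs i 0 != 0 then
              (PySem.Int.bxor p.1 (PySem.List.pyGetD lxs i (0, 0)).1,
               PySem.Int.bxor p.2 (PySem.List.pyGetD lxs i (0, 0)).2) else p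
          if PySem.List.pyGetD coeffs ((lxs.length : Int) + i) 0 != 0 then
              (PySem.Int.bxor p1.1 (PySem.List.pyGetD lzs i (0, 0)).1,
               PySem.Int.bxor p1.2 (PySem.List.pyGetD lzs i (0, 0)).2) else p1) p
      = ((((coeffs.take lxs.length).drop j).zip (lxs.drop j)).zip
          (((coeffs.drop lxs.length).drop j).zip (lzs.drop j))).foldl pvQstep p := by
  intro n
  induction n with
  | zero =>
    intro j hj p
    have hj' : j = lxs.length := by omega
    rw [PySem.List.pyRange_one_eq_nil (by exact_mod_cast Nat.le_of_eq hj'.symm)]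
    have h1 : (coeffs.take lxs.length).drop j = [] :=
      List.drop_eq_nil_of_le (by simp [hj', hc])
    rw [h1]
    simp
  | succ n ih =>
    intro j hj p
    have hjk : j < lxs.length := by omega
    have hjc : j < coeffs.length := by omega
    have hkjc : lxs.length + j < coeffs.length := by omega
    rw [PySem.List.pyRange_one_cons (by exact_mod_cast hjk), List.foldl_cons]
    rw [show ((j : Int) + 1) = ((j + 1 : Nat) : Int) from by push_cast; ring]
    rw [ih (j + 1) (by omega)]
    have e1 : (coeffs.take lxs.length).drop j
        = (coeffs.take lxs.length)[j]'(by simp; omega) :: (coeffs.take lxs.length).drop (j + 1) :=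
      List.drop_eq_getElem_cons (by simp; omega)
    have e2 : lxs.drop j = lxs[j]'hjk :: lxs.drop (j + 1) := List.drop_eq_getElem_cons hjk
    have e3 : (coeffs.drop lxs.length).drop j
        = (coeffs.drop lxs.length)[j]'(by simp; omega) :: (coeffs.drop lxs.length).drop (j + 1) :=
      List.drop_eq_getElem_cons (by simp; omega)
    have e4 : lzs.drop j = lzs[j]'(by omega) :: lzs.drop (j + 1) :=
      List.drop_eq_getElem_cons (by omega)
    conv_rhs => rw [e1, e2, e3, e4]
    rw [List.zip_cons_cons, List.zip_cons_cons, List.zip_cons_cons, List.foldl_cons]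
    congr 1
    have a1 : PySem.List.pyGetD coeffs (j : Int) 0 = (coeffs.take lxs.length)[j]'(by simp; omega) := by
      rw [PySem.List.pyGetD_natCast, List.getD_eq_getElem _ _ hjc, List.getElem_take]
    have a2 : PySem.List.pyGetD coeffs ((lxs.length : Int) + (j : Int)) 0
        = (coeffs.drop lxs.length)[j]'(by simp; omega) := by
      rw [show ((lxs.length : Int) + (j : Int)) = ((lxs.length + j : Nat) : Int) from by push_cast; ring]
      rw [PySem.List.pyGetD_natCast, List.getD_eq_getElem _ _ hkjc, List.getElem_drop]
    have a3 : PySem.List.pyGetD lxs (j : Int) ((0 : Int), (0 : Int)) = lxs[j]'hjk := by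
      rw [PySem.List.pyGetD_natCast, List.getD_eq_getElem _ _ hjk]
    have a4 : PySem.List.pyGetD lzs (j : Int) ((0 : Int), (0 : Int)) = lzs[j]'(by omega) := by
      rw [PySem.List.pyGetD_natCast, List.getD_eq_getElem _ _ (by omega)]
    simp only [a1, a2, a3, a4]
    exact pvBodyStep p _ _ _ _

-- A's whole logical loop is the xor-sum of the selected logical generators, in B's order
theorem pvLogical_eq (coeffs : List Int) (lxs lzs : List (Int × Int))
    (hc : coeffs.length = 2 * lxs.length) (hz : lxs.length ≤ lzs.length) :
    pvLogicalXor coeffs lxs lzs lxs.length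
      = pvSum (coeffs.zip (lxs ++ lzs.take lxs.length)) := by
  unfold pvLogicalXor
  have H := pvIdxFold coeffs lxs lzs hc hz lxs.length 0 (by omega) ((0 : Int), (0 : Int))
  simp only [Nat.cast_zero, List.drop_zero] at H
  rw [H]
  rw [pvQuadSplit _ _ _ (by simp [hc]; omega), pvPxor_zero_left]
  conv_rhs => rw [← List.take_append_drop lxs.length coeffs]
  rw [List.zip_append (by simp [hc]; omega)]
  show _ = List.foldl pvAccXor (0,0) _
  rw [List.foldl_append, pvFoldl_accXor, pvFoldl_accXor]
  rw [pvZipTakeRight _ _ _ (by simp [hc]; omega)]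
  rw [pvPxor_zero_left]

-- the central fold equality
theorem pvMain_eq (stab_xs stab_zs : List Int) (logical_xs logical_zs : List (Int × Int))
    (hPre : logical_xs.length ≤ logical_zs.length) :
    exact_distance stab_xs stab_zs logical_xs logical_zs
      = exact_distance_alt stab_xs stab_zs logical_xs logical_zs := by
  by_cases h0 : logical_xs.length = 0
  · simp [exact_distance, exact_distance_alt, h0]
  · simp only [exact_distance, exact_distance_alt, if_neg h0]
    congr 1
    rw [pvProd01_add, List.foldl_flatMap]
    apply Eq.symm
    refine PySem.List.foldl_congr_mem _ _ _ _ (fun acc c1 hc1 => ?_)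
    have hlen : c1.length = 2 * logical_xs.length := pvProd01_length hc1
    have hsl : ∀ c2 : List Int,
        PySem.List.slice (c1 ++ c2) none (some ((2 * logical_xs.length : Nat) : Int)) = c1 := by
      intro c2
      rw [PySem.List.slice_to_natCast, List.take_left' hlen]
    rw [List.foldl_map]
    by_cases hany : c1.any (fun c => c != 0)
    · simp only [hsl, hany, Bool.not_true, Bool.false_eq_true, if_false]
      rw [pvGroup_eq, List.foldl_map]
      refine PySem.List.foldl_congr_mem _ _ _ _ (fun acc2 c2 _ => ?_)
      congr 1
      rw [PySem.List.slice_to_natCast]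
      rw [show logical_xs ++ logical_zs.take logical_xs.length ++ stab_xs.zip stab_zs
            = (logical_xs ++ logical_zs.take logical_xs.length) ++ stab_xs.zip stab_zs from rfl]
      rw [List.zip_append (by simp [hlen]; omega)]
      rw [List.foldl_append, pvFoldl_accXor]
      rw [pvLogical_eq c1 logical_xs logical_zs hlen hPre]
      simp [pvPauliMul, pvPauliWeight, pvPxor, pvSum]
    · simp only [hsl, hany, Bool.not_false, if_true]
      rw [pvFoldl_keep]

-- ===== VERDICT (by name: the statement is the Claim_ definition above) =====
theorem exact_distance_spec : Claim_equal_exact_distance := by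
  intro stab_xs stab_zs logical_xs logical_zs _ hPre
  unfold Spec_exact_distance
  exact pvMain_eq stab_xs stab_zs logical_xs logical_zs hPre
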